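-- pv_equiv track=rewrite | github.com/abdurahman-nigmetov/pp2 | contests/w3/3.py | from_statemant
-- ===== SOURCE A (Python) =====
-- nums = {
--         "ONE": 1,
--         "TWO": 2,
--         "THR": 3,
--         "FOU": 4,
--         "FIV": 5,
--         "SIX": 6,
--         "SEV": 7,
--         "EIG": 8,
--         "NIN": 9,
--         "ZER": 0
--     }
--
-- def from_statemant(n: int) -> str:
--     if n == 0:
--         return "ZER"
--     result = ""
--     while n > 0:
--         digit = n % 10
--         for key, value in nums.items():
--             if value == digit:
--                 result = key + result
--                 break
--         n //= 10
--     return result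
-- ===== SOURCE B (Python) =====
-- CODES = {
--     "0": "ZER", "1": "ONE", "2": "TWO", "3": "THR", "4": "FOU",
--     "5": "FIV", "6": "SIX", "7": "SEV", "8": "EIG", "9": "NIN",
-- }
--
-- def from_statemant(n: int) -> str:
--     if n == 0:
--         return "ZER"
--     return "".join(CODES[d] for d in str(n))
-- ===== Notes on version B (the rewrite author's own statement) =====
-- stated objective: simpler
-- what changed: Replaces the modular digit-extraction loop with its linear scan of the name-to-digit dict by a single str(n) conversion mapped through a digit-to-code dict and joined left to right.
-- outside the precondition, e.g. on from_statemant(-5): A returns '', B raises KeyError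
import Mathlib
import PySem

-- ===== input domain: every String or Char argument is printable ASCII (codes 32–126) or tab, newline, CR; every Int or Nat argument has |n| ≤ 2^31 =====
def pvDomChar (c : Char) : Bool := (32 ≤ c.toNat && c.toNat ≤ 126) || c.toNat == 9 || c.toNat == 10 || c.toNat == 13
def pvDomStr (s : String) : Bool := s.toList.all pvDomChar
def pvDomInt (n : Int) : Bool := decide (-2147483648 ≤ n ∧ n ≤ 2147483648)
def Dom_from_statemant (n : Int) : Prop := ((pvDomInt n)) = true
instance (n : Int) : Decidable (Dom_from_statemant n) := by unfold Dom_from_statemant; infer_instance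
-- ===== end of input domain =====

-- B replaces A's modular digit-extraction loop (with its inner scan of the name→digit dict)
-- by one str(n) conversion mapped through a digit→code dict; objective: simpler.
-- Strings are handled as List Char (PySem.Chars convention) and packed with String.ofList.

-- ===== PORT A =====
-- the module-level dict 'nums' (name → digit), insertion order; keys kept as List Char
def numsA : List (List Char × Int) :=
  [(['O','N','E'], 1), (['T','W','O'], 2), (['T','H','R'], 3), (['F','O','U'], 4),
   (['F','I','V'], 5), (['S','I','X'], 6), (['S','E','V'], 7), (['E','I','G'], 8),
   (['N','I','N'], 9), (['Z','E','R'], 0)]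

-- the inner 'for key, value in nums.items(): if value == digit: result = key + result; break'
def digitKeyA (digit : Int) : List (List Char × Int) → List Char → List Char
  | [], result => result
  | (k, v) :: rest, result =>
    if v == digit then k ++ result else digitKeyA digit rest result

-- the 'while n > 0' loop carrying 'result'
def loopA (n : Int) (result : List Char) : List Char :=
  if _h : n > 0 then
    loopA (PySem.Int.floordiv n 10) (digitKeyA (PySem.Int.mod n 10) numsA result)
  else result
termination_by n.toNat
decreasing_by
  have h10 : PySem.Int.floordiv n 10 = n / 10 :=
    PySem.Int.floordiv_eq_ediv_of_pos (by omega)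
  rw [h10]; omega

def from_statemant (n : Int) : String :=
  if n == 0 then "ZER" else String.ofList (loopA n [])

-- ===== PORT B =====
-- the module-level dict CODES (digit char → code), keys as the one-char strings of Source B
def codesB : PySem.Dict (List Char) (List Char) :=
  PySem.Dict.mk [(['0'], ['Z','E','R']), (['1'], ['O','N','E']), (['2'], ['T','W','O']),
   (['3'], ['T','H','R']), (['4'], ['F','O','U']), (['5'], ['F','I','V']),
   (['6'], ['S','I','X']), (['7'], ['S','E','V']), (['8'], ['E','I','G']),
   (['9'], ['N','I','N'])]

-- '"".join(CODES[d] for d in str(n))'; CODES[d] via Dict.get? (none = KeyError, outside Pre_)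
def from_statemant_alt (n : Int) : String :=
  if n == 0 then "ZER"
  else String.ofList (PySem.Chars.join []
    ((PySem.Int.toChars n).map (fun c => (PySem.Dict.get? codesB [c]).getD [])))

-- ===== PRECONDITION & SPEC =====
-- Pre_ excludes negative n, on which A's while loop never runs and its empty-string result is
-- an accident of the loop condition; B's digit mapping itself raises KeyError on the '-' there.
def Pre_from_statemant (n : Int) : Prop := 0 ≤ n
instance (n : Int) : Decidable (Pre_from_statemant n) := by unfold Pre_from_statemant; infer_instance
def pvWitness_from_statemant : Int := (7)

def Spec_from_statemant (n : Int) (out : String) : Prop := out = from_statemant_alt n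
instance (n : Int) (out : String) : Decidable (Spec_from_statemant n out) := by unfold Spec_from_statemant; infer_instance

-- ===== CLAIM (what is proved, stated in full; the proofs are below) =====
def Claim_equal_from_statemant : Prop := ∀ (n : Int), Dom_from_statemant n → Pre_from_statemant n → Spec_from_statemant n (from_statemant n)

-- ===== LEMMAS AND PROOFS =====

-- reference digit list: what Nat.toDigits 10 computes
def digitList (n : Nat) : List Char :=
  if n < 10 then [Nat.digitChar n]
  else digitList (n / 10) ++ [Nat.digitChar (n % 10)]
termination_by n
decreasing_by exact Nat.div_lt_self (by omega) (by omega)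

lemma toDigitsCore_eq_digitList :
    ∀ (n : ℕ), ∀ (f : ℕ), n < f → ∀ (ds : List Char),
      Nat.toDigitsCore 10 f n ds = digitList n ++ ds := by
  intro n
  induction n using Nat.strong_induction_on with
  | _ n ih =>
    intro f hf ds
    match f, hf with
    | f + 1, _ =>
      rw [Nat.toDigitsCore]
      by_cases h10 : n / 10 = 0
      · rw [if_pos h10, Nat.mod_eq_of_lt (by omega), digitList, if_pos (by omega)]
        simp
      · rw [if_neg h10]
        have hn : 10 ≤ n := by omega
        rw [ih (n / 10) (by omega) f (by omega)]
        have hdl : digitList n = digitList (n / 10) ++ [Nat.digitChar (n % 10)] := by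
          rw [digitList, if_neg (by omega)]
        rw [hdl]
        simp

lemma toDigits_eq_digitList (n : ℕ) : Nat.toDigits 10 n = digitList n := by
  have := toDigitsCore_eq_digitList n (n + 1) (by omega) []
  simpa [Nat.toDigits] using this

-- the code B joins for one digit character
def keyOf (d : ℕ) : List Char :=
  (PySem.Dict.get? codesB [Nat.digitChar d]).getD []

-- A's inner dict scan finds exactly B's code for every decimal digit
lemma digitKeyA_eq_keyOf (d : ℕ) (hd : d < 10) (result : List Char) :
    digitKeyA (↑d) numsA result = keyOf d ++ result := by
  interval_cases d <;> simp [digitKeyA, numsA, keyOf, codesB, Nat.digitChar, PySem.Dict.get?]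

-- B's join is a flatten
lemma join_nil_eq_flatten (l : List (List Char)) :
    PySem.Chars.join [] l = l.flatten := by
  induction l with
  | nil => decide
  | cons x xs ih =>
    cases xs with
    | nil => simp [PySem.Chars.join_singleton]
    | cons y ys => rw [PySem.Chars.join_cons_cons]; simp_all

def joinCodes (l : List Char) : List Char :=
  PySem.Chars.join [] (l.map (fun c => (PySem.Dict.get? codesB [c]).getD []))

lemma joinCodes_append (a b : List Char) :
    joinCodes (a ++ b) = joinCodes a ++ joinCodes b := by
  simp [joinCodes, join_nil_eq_flatten]

lemma joinCodes_digitChar (d : ℕ) :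
    joinCodes [Nat.digitChar d] = keyOf d := by
  simp [joinCodes, keyOf]

-- the main loop invariant: A's prepend loop builds B's left-to-right join
lemma loopA_eq (m : ℕ) (hm : 0 < m) :
    ∀ result : List Char, loopA (↑m) result = joinCodes (digitList m) ++ result := by
  induction m using Nat.strong_induction_on with
  | _ m ih =>
    intro result
    rw [loopA, dif_pos (by exact_mod_cast hm)]
    have hmod : PySem.Int.mod (↑m) 10 = ((m % 10 : ℕ) : Int) := PySem.Int.mod_natCast m 10
    have hdiv : PySem.Int.floordiv (↑m) 10 = ((m / 10 : ℕ) : Int) := PySem.Int.floordiv_natCast m 10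
    rw [hmod, hdiv, digitKeyA_eq_keyOf (m % 10) (by omega)]
    by_cases h10 : m < 10
    · have : m / 10 = 0 := by omega
      rw [this]
      rw [loopA, dif_neg (by norm_num)]
      rw [digitList, if_pos h10, joinCodes_digitChar]
      congr 2
      omega
    · have hdl : digitList m = digitList (m / 10) ++ [Nat.digitChar (m % 10)] := by
        rw [digitList, if_neg h10]
      rw [ih (m / 10) (Nat.div_lt_self hm (by omega)) (Nat.div_pos (by omega) (by omega))]
      rw [hdl, joinCodes_append, joinCodes_digitChar]
      simp

-- ===== VERDICT (by name: the statement is the Claim_ definition above) =====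
theorem from_statemant_spec : Claim_equal_from_statemant := by
  intro n _ hpre
  unfold Spec_from_statemant from_statemant from_statemant_alt
  by_cases h0 : n = 0
  · simp [h0]
  · rw [if_neg (by simpa using h0), if_neg (by simpa using h0)]
    have hn : 0 < n := lt_of_le_of_ne hpre (Ne.symm h0)
    obtain ⟨m, rfl⟩ : ∃ m : ℕ, n = (m : Int) := ⟨n.toNat, (Int.toNat_of_nonneg hpre).symm⟩
    have hm : 0 < m := by exact_mod_cast hn
    have htc : PySem.Int.toChars (↑m) = digitList m := by
      rw [PySem.Int.toChars, if_neg (by omega)]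
      simpa using toDigits_eq_digitList m
    rw [loopA_eq m hm, htc]
    simp [joinCodes]
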